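-- pv_equiv track=rewrite | github.com/tapiatellez/LegibilityRankers | Code/obtainMet6.0.py | divideEightyTwenty
-- ===== SOURCE A (Python) =====
-- def divideEightyTwenty(M):
--     twenty = {}
--     eighty = {}
--     counter = 0
--     stop = int(len(M)/5)
--     for v, vvec in M.items():
--         if counter <= stop:
--             twenty[v] = vvec
--         else:
--             eighty[v] = vvec
--         counter += 1
--     return twenty, eighty
-- ===== SOURCE B (Python) =====
-- def divideEightyTwenty(M):
--     # copy-then-move: start with everything in twenty, then move the keys
--     # past the 20% boundary into eighty by popping them out
--     twenty = dict(M)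
--     eighty = {}
--     for k in list(M)[len(M) // 5 + 1:]:
--         eighty[k] = twenty.pop(k)
--     return twenty, eighty
-- ===== Notes on version B (the rewrite author's own statement) =====
-- stated objective: alternative
-- what changed: Instead of A's counting loop that branches each item into one of two dicts, B copies the whole dict into twenty and then moves the keys past the 20% boundary into eighty by popping them out (copy-then-move by deletion, no counter and no per-element branch).
import Mathlib
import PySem

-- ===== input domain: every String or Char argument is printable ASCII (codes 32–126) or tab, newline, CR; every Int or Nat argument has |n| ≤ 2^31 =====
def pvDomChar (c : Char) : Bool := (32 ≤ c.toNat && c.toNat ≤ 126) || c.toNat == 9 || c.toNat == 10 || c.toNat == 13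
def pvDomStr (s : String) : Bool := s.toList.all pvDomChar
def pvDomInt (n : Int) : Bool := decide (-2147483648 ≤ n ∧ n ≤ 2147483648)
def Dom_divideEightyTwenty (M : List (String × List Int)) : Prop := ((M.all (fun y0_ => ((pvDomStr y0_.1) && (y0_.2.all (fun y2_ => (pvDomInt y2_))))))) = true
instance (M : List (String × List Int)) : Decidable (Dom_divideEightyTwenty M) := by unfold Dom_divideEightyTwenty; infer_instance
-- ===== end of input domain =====

-- B replaces A's counting loop (branch each item into one of two dicts) by copy-then-move:
-- copy M into twenty, then pop the keys past the 20% boundary out of twenty into eighty.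
-- Objective: alternative (same cost, different algorithm).

-- ===== PORT A =====
-- the 'for v, vvec in M.items()' loop with state (twenty, eighty, counter)
def divA_loop (l : List (String × List Int))
    (twenty eighty : PySem.Dict String (List Int)) (counter stop : Int) :
    PySem.Dict String (List Int) × PySem.Dict String (List Int) :=
  match l with
  | [] => (twenty, eighty)
  | (v, vvec) :: rest =>
    if counter ≤ stop then
      divA_loop rest (twenty.insert v vvec) eighty (counter + 1) stop
    else
      divA_loop rest twenty (eighty.insert v vvec) (counter + 1) stop

def divideEightyTwenty (M : List (String × List Int)) : (List (String × List Int)) × (List (String × List Int)) :=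
  let stop : Int := PySem.Int.floordiv (M.length : Int) 5   -- int(len(M)/5), len ≥ 0
  let p := divA_loop M PySem.Dict.empty PySem.Dict.empty 0 stop
  (p.1.items, p.2.items)

-- ===== PORT B =====
-- 'for k in list(M)[cut:]: eighty[k] = twenty.pop(k)'; Python raises KeyError when the key is
-- absent — that cannot happen under Pre_ (distinct keys), the 'none' branch is unreachable there
def divB_loop (ks : List String)
    (twenty eighty : PySem.Dict String (List Int)) :
    PySem.Dict String (List Int) × PySem.Dict String (List Int) :=
  match ks with
  | [] => (twenty, eighty)
  | k :: rest =>
    match twenty.pop? k with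
    | some (v, t') => divB_loop rest t' (eighty.insert k v)
    | none => divB_loop rest twenty eighty

def divideEightyTwenty_alt (M : List (String × List Int)) : (List (String × List Int)) × (List (String × List Int)) :=
  let twenty := PySem.Dict.ofList M                          -- dict(M)
  let cut : Int := PySem.Int.floordiv (M.length : Int) 5 + 1
  let ks := PySem.List.slice (M.map Prod.fst) (some cut) none   -- list(M)[cut:]
  let p := divB_loop ks twenty PySem.Dict.empty
  (p.1.items, p.2.items)

-- ===== PRECONDITION & SPEC =====
-- M stands for a Python dict; Pre_ only excludes association lists with duplicate keys, which do
-- not represent any dict input (a Python dict cannot pass one to A), so no returning input is lost.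
def Pre_divideEightyTwenty (M : List (String × List Int)) : Prop := (M.map Prod.fst).Nodup
instance (M : List (String × List Int)) : Decidable (Pre_divideEightyTwenty M) := by unfold Pre_divideEightyTwenty; infer_instance

def pvWitness_divideEightyTwenty : (List (String × List Int)) := [("a", [1]), ("b", [2, 3])]

def Spec_divideEightyTwenty (M : List (String × List Int)) (out : (List (String × List Int)) × (List (String × List Int))) : Prop := out = divideEightyTwenty_alt M
instance (M : List (String × List Int)) (out : (List (String × List Int)) × (List (String × List Int))) : Decidable (Spec_divideEightyTwenty M out) := by unfold Spec_divideEightyTwenty; infer_instance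

-- ===== CLAIM (what is proved, stated in full; the proofs are below) =====
def Claim_equal_divideEightyTwenty : Prop := ∀ (M : List (String × List Int)), Dom_divideEightyTwenty M → Pre_divideEightyTwenty M → Spec_divideEightyTwenty M (divideEightyTwenty M)

-- ===== LEMMAS AND PROOFS =====

def foldIns (d : PySem.Dict String (List Int)) (l : List (String × List Int)) :
    PySem.Dict String (List Int) :=
  l.foldl (fun d p => d.insert p.1 p.2) d

lemma divA_loop_eq (l : List (String × List Int))
    (t e : PySem.Dict String (List Int)) (c stop : Int) :
    divA_loop l t e c stop =
      (foldIns t (l.take (stop + 1 - c).toNat), foldIns e (l.drop (stop + 1 - c).toNat)) := by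
  induction l generalizing t e c with
  | nil => simp [divA_loop, foldIns]
  | cons x rest ih =>
    obtain ⟨v, vvec⟩ := x
    by_cases h : c ≤ stop
    · have hn : (stop + 1 - c).toNat = (stop + 1 - (c + 1)).toNat + 1 := by omega
      rw [divA_loop, if_pos h, ih, hn]
      simp [foldIns]
    · have h0 : (stop + 1 - c).toNat = 0 := by omega
      have h0' : (stop + 1 - (c + 1)).toNat = 0 := by omega
      rw [divA_loop, if_neg h, ih, h0, h0']
      simp [foldIns]

lemma foldIns_items_fresh (l : List (String × List Int)) (h : (l.map Prod.fst).Nodup) :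
    (foldIns PySem.Dict.empty l).items = l := by
  unfold foldIns
  have := PySem.Dict.items_foldl_insert_fresh l Prod.fst Prod.snd PySem.Dict.empty
      (fun a _ => PySem.Dict.contains_empty _) h
  simpa using this

lemma divB_loop_eq (pre post : List (String × List Int))
    (e : PySem.Dict String (List Int))
    (h : ((pre ++ post).map Prod.fst).Nodup) :
    divB_loop (post.map Prod.fst) (PySem.Dict.mk (pre ++ post)) e
      = (PySem.Dict.mk pre, foldIns e post) := by
  induction post generalizing e with
  | nil => simp [divB_loop, foldIns]
  | cons kv rest ih =>
    obtain ⟨k, v⟩ := kv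
    have hnd : (PySem.Dict.mk (pre ++ (k, v) :: rest)).keys.Nodup := by
      simpa [PySem.Dict.keys] using h
    have hget : (PySem.Dict.mk (pre ++ (k, v) :: rest)).get? k = some v :=
      PySem.Dict.get?_of_mem_items _ (by simp) hnd
    rw [List.map_append, List.map_cons] at h
    have h1 : (pre.map Prod.fst).Nodup := h.of_append_left
    have h2 : (k :: rest.map Prod.fst).Nodup := h.of_append_right
    have hdisj : List.Disjoint (pre.map Prod.fst) (k :: rest.map Prod.fst) :=
      List.disjoint_of_nodup_append h
    have hkpre : k ∉ pre.map Prod.fst := fun hk => hdisj hk (List.mem_cons_self)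
    have hkrest : k ∉ rest.map Prod.fst := (List.nodup_cons.mp h2).1
    have herase : (PySem.Dict.mk (pre ++ (k, v) :: rest)).erase k = PySem.Dict.mk (pre ++ rest) := by
      simp only [PySem.Dict.erase, List.filter_append, List.filter_cons]
      have hp : pre.filter (fun p => !p.1 == k) = pre := by
        apply List.filter_eq_self.mpr
        intro p hp
        have hne : p.1 ≠ k := fun hek => hkpre (hek ▸ List.mem_map_of_mem hp)
        simp [hne]
      have hr : rest.filter (fun p => !p.1 == k) = rest := by
        apply List.filter_eq_self.mpr
        intro p hp
        have hne : p.1 ≠ k := fun hek => hkrest (hek ▸ List.mem_map_of_mem hp)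
        simp [hne]
      simp [hp, hr]
    have h' : ((pre ++ rest).map Prod.fst).Nodup := by
      rw [List.map_append]
      refine List.nodup_append.mpr ⟨h1, (List.nodup_cons.mp h2).2, ?_⟩
      intro a ha b hb heq
      exact hdisj ha (List.mem_cons.mpr (Or.inr (heq ▸ hb)))
    rw [List.map_cons, divB_loop, PySem.Dict.pop?, hget]
    simp only [Option.map_some]
    rw [herase, ih _ h']
    simp [foldIns]

-- ===== VERDICT (by name: the statement is the Claim_ definition above) =====
theorem divideEightyTwenty_spec : Claim_equal_divideEightyTwenty := by
  intro M _ hpre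
  show divideEightyTwenty M = divideEightyTwenty_alt M
  unfold divideEightyTwenty divideEightyTwenty_alt
  dsimp only
  have hfd : PySem.Int.floordiv (M.length : Int) 5 = ((M.length / 5 : Nat) : Int) := by
    exact_mod_cast PySem.Int.floordiv_natCast M.length 5
  have hcut : PySem.Int.floordiv (M.length : Int) 5 + 1 = ((M.length / 5 + 1 : Nat) : Int) := by
    rw [hfd]; push_cast; ring
  -- dict(M) is literally the list M as items, keys being distinct
  have hdict : PySem.Dict.ofList M = PySem.Dict.mk M := by
    apply PySem.Dict.ext
    have : PySem.Dict.ofList M = foldIns PySem.Dict.empty M := by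
      simp [PySem.Dict.ofList, PySem.Dict.update, foldIns]
    rw [this, foldIns_items_fresh M hpre]
  set n : Nat := M.length / 5 + 1 with hn
  have hsplit : M = M.take n ++ M.drop n := (List.take_append_drop n M).symm
  rw [divA_loop_eq, hdict, hcut, PySem.List.slice_from_natCast]
  have hks : (M.map Prod.fst).drop n = (M.drop n).map Prod.fst := (List.map_drop ..).symm
  rw [hks]
  rw [show PySem.Dict.mk M = PySem.Dict.mk (M.take n ++ M.drop n) from by rw [← hsplit]]
  rw [divB_loop_eq _ _ _ (by rw [← hsplit]; exact hpre)]
  have h1 : ((n : Int) - 0).toNat = n := by omega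
  rw [h1]
  have htake : (foldIns PySem.Dict.empty (M.take n)).items = M.take n := by
    apply foldIns_items_fresh
    rw [List.map_take]
    exact ((M.map Prod.fst).take_sublist n).nodup hpre
  simp [htake]
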